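-- pv_equiv track=rewrite | github.com/wbubblerteam/bubcoin | rechainparamser.py | replace_pchms
-- ===== SOURCE A (Python) =====
-- PCHMS_FORMAT = 'pchMessageStart[{}] = 0x{:02x};'
--
-- REPLACES_PCHMS = {
--     # main
--     'f9beb4d9': 'ffdfdcfe',
--     # testnet
--     '0b110907': 'abd3bfa5',
--     # signet
--     'fabfb5da': 'a9cdccff',
-- }
--
-- def replace_pchms(chainparams: str) -> str:
--     modified = chainparams
--     mapping = REPLACES_PCHMS
--
--     for key, value in mapping.items():
--         old_bytes = bytes.fromhex(key)
--         new_bytes = bytes.fromhex(value)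
--
--         for i in range(len(old_bytes)):
--             old_declare = PCHMS_FORMAT.format(i, old_bytes[i])
--             new_declare = PCHMS_FORMAT.format(i, new_bytes[i])
--             modified = modified.replace(old_declare, new_declare)
--
--     return modified
-- ===== SOURCE B (Python) =====
-- # The three magic numbers are fixed constants, so the twelve declaration
-- # rewrites are written out literally and applied in one left-to-right scan.
-- _PCHMS_TABLE = {
--     'pchMessageStart[0] = 0xf9;': 'pchMessageStart[0] = 0xff;',
--     'pchMessageStart[1] = 0xbe;': 'pchMessageStart[1] = 0xdf;',
--     'pchMessageStart[2] = 0xb4;': 'pchMessageStart[2] = 0xdc;',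
--     'pchMessageStart[3] = 0xd9;': 'pchMessageStart[3] = 0xfe;',
--     'pchMessageStart[0] = 0x0b;': 'pchMessageStart[0] = 0xab;',
--     'pchMessageStart[1] = 0x11;': 'pchMessageStart[1] = 0xd3;',
--     'pchMessageStart[2] = 0x09;': 'pchMessageStart[2] = 0xbf;',
--     'pchMessageStart[3] = 0x07;': 'pchMessageStart[3] = 0xa5;',
--     'pchMessageStart[0] = 0xfa;': 'pchMessageStart[0] = 0xa9;',
--     'pchMessageStart[1] = 0xbf;': 'pchMessageStart[1] = 0xcd;',
--     'pchMessageStart[2] = 0xb5;': 'pchMessageStart[2] = 0xcc;',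
--     'pchMessageStart[3] = 0xda;': 'pchMessageStart[3] = 0xff;',
-- }
--
--
-- def replace_pchms(chainparams: str) -> str:
--     # All declarations are exactly 26 characters long; rewrite in one pass.
--     out = []
--     pos = 0
--     n = len(chainparams)
--     while pos < n:
--         repl = _PCHMS_TABLE.get(chainparams[pos:pos + 26])
--         if repl is None:
--             out.append(chainparams[pos])
--             pos += 1
--         else:
--             out.append(repl)
--             pos += 26
--     return ''.join(out)
-- ===== Notes on version B (the rewrite author's own statement) =====
-- stated objective: alternative
-- what changed: B replaces A's runtime hex-decoding and twelve sequential full-text str.replace passes with a hard-coded literal table of the twelve 26-character declaration rewrites and a single left-to-right scan of the text.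
import Mathlib
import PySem

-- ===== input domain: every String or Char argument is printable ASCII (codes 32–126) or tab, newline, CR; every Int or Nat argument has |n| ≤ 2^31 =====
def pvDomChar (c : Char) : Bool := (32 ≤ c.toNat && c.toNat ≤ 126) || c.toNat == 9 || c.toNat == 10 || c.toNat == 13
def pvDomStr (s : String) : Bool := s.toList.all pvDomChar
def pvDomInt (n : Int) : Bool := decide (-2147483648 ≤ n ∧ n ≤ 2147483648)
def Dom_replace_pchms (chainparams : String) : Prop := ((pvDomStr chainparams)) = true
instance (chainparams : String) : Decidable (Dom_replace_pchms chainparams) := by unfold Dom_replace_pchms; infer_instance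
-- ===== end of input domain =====

-- B replaces A's runtime hex decoding and twelve sequential full-text str.replace passes by a
-- hard-coded literal table of the twelve declaration rewrites applied in one left-to-right scan
-- (objective: alternative, same cost class).

-- ===== PORT A =====

-- hex digit value, as used by bytes.fromhex on its lowercase-hex literals (exact there)
def pvHexVal (c : Char) : Nat :=
  if c.toNat ≥ 97 then c.toNat - 87 else c.toNat - 48

-- bytes.fromhex: consume the hex string two digits at a time (exact on even-length hex literals)
def pvFromhex (s : String) : List Int :=
  pvFromhexGo s.toList
where
  pvFromhexGo : List Char → List Int
  | a :: b :: rest => (16 * pvHexVal a + pvHexVal b : Nat) :: pvFromhexGo rest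
  | _ => []

def pvHexChar (n : Nat) : Char :=
  if n < 10 then Char.ofNat (48 + n) else Char.ofNat (87 + n)

-- '{:02x}'.format(b): two lowercase hex digits (exact for 0 ≤ b < 256, the only values
-- bytes.fromhex yields here)
def pvFmt02x (b : Int) : String :=
  String.ofList [pvHexChar (b.toNat / 16), pvHexChar (b.toNat % 16)]

-- PCHMS_FORMAT.format(i, b)
def pvPchmsFormat (i : Int) (b : Int) : String :=
  "pchMessageStart[" ++ PySem.Int.toStr i ++ "] = 0x" ++ pvFmt02x b ++ ";"

-- REPLACES_PCHMS as an insertion-ordered association list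
def pvReplacesPchms : List (String × String) :=
  [("f9beb4d9", "ffdfdcfe"), ("0b110907", "abd3bfa5"), ("fabfb5da", "a9cdccff")]

def replace_pchms (chainparams : String) : String :=
  pvReplacesPchms.foldl
    (fun modified kv =>
      let old_bytes := pvFromhex kv.1
      let new_bytes := pvFromhex kv.2
      (PySem.List.pyRange 0 (old_bytes.length : Int) 1).foldl
        (fun m i =>
          -- old_bytes[i] / new_bytes[i]: i is always in range here
          let old_declare := pvPchmsFormat i (PySem.List.pyGetD old_bytes i 0)
          let new_declare := pvPchmsFormat i (PySem.List.pyGetD new_bytes i 0)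
          PySem.Str.replace m old_declare new_declare)
        modified)
    chainparams

-- ===== PORT B =====

-- _PCHMS_TABLE of Source B: the twelve declaration rewrites, written out literally
def pvPchmsTable : PySem.Dict String String :=
  PySem.Dict.ofList
    [("pchMessageStart[0] = 0xf9;", "pchMessageStart[0] = 0xff;"),
     ("pchMessageStart[1] = 0xbe;", "pchMessageStart[1] = 0xdf;"),
     ("pchMessageStart[2] = 0xb4;", "pchMessageStart[2] = 0xdc;"),
     ("pchMessageStart[3] = 0xd9;", "pchMessageStart[3] = 0xfe;"),
     ("pchMessageStart[0] = 0x0b;", "pchMessageStart[0] = 0xab;"),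
     ("pchMessageStart[1] = 0x11;", "pchMessageStart[1] = 0xd3;"),
     ("pchMessageStart[2] = 0x09;", "pchMessageStart[2] = 0xbf;"),
     ("pchMessageStart[3] = 0x07;", "pchMessageStart[3] = 0xa5;"),
     ("pchMessageStart[0] = 0xfa;", "pchMessageStart[0] = 0xa9;"),
     ("pchMessageStart[1] = 0xbf;", "pchMessageStart[1] = 0xcd;"),
     ("pchMessageStart[2] = 0xb5;", "pchMessageStart[2] = 0xcc;"),
     ("pchMessageStart[3] = 0xda;", "pchMessageStart[3] = 0xff;")]

-- the while loop of Source B: at each position look the 26-char chunk up in the table;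
-- on a hit emit the replacement and advance by 26 (= drop 25 of the tail), else copy one char
def pvScan (table : PySem.Dict String String) : List Char → List Char
  | [] => []
  | c :: cs =>
    match table.get? (String.ofList ((c :: cs).take 26)) with
    | none => c :: pvScan table cs
    | some r => r.toList ++ pvScan table (cs.drop 25)
termination_by l => l.length
decreasing_by
  all_goals simp

def replace_pchms_alt (chainparams : String) : String :=
  String.ofList (pvScan pvPchmsTable chainparams.toList)

-- ===== PRECONDITION & SPEC =====
def Spec_replace_pchms (chainparams : String) (out : String) : Prop := out = replace_pchms_alt chainparams
instance (chainparams : String) (out : String) : Decidable (Spec_replace_pchms chainparams out) := by unfold Spec_replace_pchms; infer_instance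

-- ===== CLAIM (what is proved, stated in full; the proofs are below) =====
def Claim_equal_replace_pchms : Prop := ∀ (chainparams : String), Dom_replace_pchms chainparams → Spec_replace_pchms chainparams (replace_pchms chainparams)

-- ===== LEMMAS AND PROOFS =====

-- structural version of PySem.Chars.replace for a nonempty pattern o :: os
def pvRepl (o : Char) (os new : List Char) : List Char → List Char
  | [] => []
  | c :: t =>
    if (o :: os).isPrefixOf (c :: t) then new ++ pvRepl o os new (t.drop os.length)
    else c :: pvRepl o os new t
termination_by l => l.length
decreasing_by all_goals simp

lemma pvGo_eq (o : Char) (os new : List Char) :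
    ∀ (fuel : Nat) (l acc : List Char), l.length ≤ fuel →
      PySem.Chars.replace.go (o :: os) new fuel l acc = acc.reverse ++ pvRepl o os new l := by
  intro fuel
  induction fuel with
  | zero =>
    intro l acc h
    have : l = [] := List.eq_nil_of_length_eq_zero (Nat.le_zero.mp h)
    subst this
    simp [PySem.Chars.replace.go, pvRepl]
  | succ n ih =>
    intro l acc h
    cases l with
    | nil => simp [PySem.Chars.replace.go, pvRepl]
    | cons c t =>
      rw [PySem.Chars.replace.go, pvRepl]
      by_cases hp : (o :: os).isPrefixOf (c :: t)
      · simp only [hp, if_true]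
        rw [ih _ _ (by simpa using Nat.le_trans (Nat.sub_le _ _) (Nat.lt_succ_iff.mp (by simpa using h)))]
        simp [List.drop_succ_cons]
      · simp only [hp, if_false, Bool.false_eq_true]
        rw [ih _ _ (Nat.lt_succ_iff.mp (by simpa using h))]
        simp

lemma pvReplace_eq (o : Char) (os new l : List Char) :
    PySem.Chars.replace l (o :: os) new = pvRepl o os new l := by
  rw [PySem.Chars.replace]
  simpa using pvGo_eq o os new l.length l [] le_rfl

-- string-level replace folds commute with toList
lemma pvFold_toList (ps : List (String × String)) (s : String) :
    (ps.foldl (fun m pr => PySem.Str.replace m pr.1 pr.2) s).toList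
      = ps.foldl (fun l pr => PySem.Chars.replace l pr.1.toList pr.2.toList) s.toList := by
  induction ps generalizing s with
  | nil => rfl
  | cons pr ps ih => simp [List.foldl_cons, ih, PySem.Str.toList_replace]

-- shape of every declaration string: 26 chars, 'p' first and nowhere else
abbrev pvP26 (p : List Char) : Prop :=
  p.length = 26 ∧ p.head? = some 'p' ∧ p.tail.all (fun c => c != 'p') = true

lemma pvP26_nonp {p : List Char} (h : pvP26 p) : ∀ c ∈ p.tail, c ≠ 'p' :=
  fun c hc => by simpa using List.all_eq_true.mp h.2.2 c hc


def pvGood (d : PySem.Dict String String) : Prop :=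
  ∀ k w, d.get? k = some w → pvP26 k.toList ∧ pvP26 w.toList

lemma pvScan_nil (d : PySem.Dict String String) : pvScan d [] = [] := by
  rw [pvScan]

lemma pvScan_cons (d : PySem.Dict String String) (c : Char) (cs : List Char) :
    pvScan d (c :: cs)
      = match d.get? (String.ofList ((c :: cs).take 26)) with
        | none => c :: pvScan d cs
        | some r => r.toList ++ pvScan d (cs.drop 25) := by
  rw [pvScan]

lemma pvScan_cons_none (d : PySem.Dict String String) (c : Char) (cs : List Char)
    (h : d.get? (String.ofList ((c :: cs).take 26)) = none) :
    pvScan d (c :: cs) = c :: pvScan d cs := by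
  rw [pvScan_cons, h]

lemma pvScan_cons_some (d : PySem.Dict String String) (c : Char) (cs : List Char) (r : String)
    (h : d.get? (String.ofList ((c :: cs).take 26)) = some r) :
    pvScan d (c :: cs) = r.toList ++ pvScan d (cs.drop 25) := by
  rw [pvScan_cons, h]

lemma pvScan_empty (l : List Char) : pvScan PySem.Dict.empty l = l := by
  induction l with
  | nil => exact pvScan_nil _
  | cons c cs ih =>
    rw [pvScan_cons_none _ _ _ rfl, ih]

-- the scanner copies a block of non-'p' characters unchanged
lemma pvScan_copy (d : PySem.Dict String String) (hd : pvGood d) :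
    ∀ (u t : List Char), (∀ c ∈ u, c ≠ 'p') →
      pvScan d (u ++ t) = u ++ pvScan d t := by
  intro u
  induction u with
  | nil => intro t _; rfl
  | cons c u ih =>
    intro t hu
    have hc : c ≠ 'p' := hu c (List.mem_cons_self ..)
    have hnone : d.get? (String.ofList ((c :: (u ++ t)).take 26)) = none := by
      cases hW : d.get? (String.ofList ((c :: (u ++ t)).take 26)) with
      | none => rfl
      | some w =>
        exfalso
        have h1 := (hd _ _ hW).1
        rw [String.toList_ofList] at h1
        have := h1.2.1
        simp [List.take_succ_cons] at this
        exact hc this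
    rw [List.cons_append, pvScan_cons_none d c (u ++ t) hnone,
      ih t (fun c hcm => hu c (List.mem_cons_of_mem _ hcm))]
    simp

-- a 'p'-free prefix of the scanner's output is a prefix of its input
lemma pvScan_prefix_nonp (d : PySem.Dict String String) (hd : pvGood d) :
    ∀ (l v : List Char), (∀ c ∈ v, c ≠ 'p') → v <+: pvScan d l → v <+: l := by
  intro l
  have H : ∀ (n : Nat) (l : List Char), l.length ≤ n → ∀ v, (∀ c ∈ v, c ≠ 'p') → v <+: pvScan d l → v <+: l := by
    intro n
    induction n with
    | zero =>
      intro l hl v hv hpre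
      have : l = [] := List.eq_nil_of_length_eq_zero (Nat.le_zero.mp hl)
      subst this
      rwa [pvScan_nil] at hpre
    | succ n ih =>
      intro l hl v hv hpre
      cases l with
      | nil => rwa [pvScan_nil] at hpre
      | cons c cs =>
        cases hW : d.get? (String.ofList ((c :: cs).take 26)) with
        | some w =>
          rw [pvScan_cons_some d c cs w hW] at hpre
          cases v with
          | nil => exact List.nil_prefix
          | cons a v =>
            exfalso
            have hw := (hd _ _ hW).2
            obtain ⟨wt, hwt⟩ := (List.head?_eq_some_iff ..).mp hw.2.1
            rw [hwt, List.cons_append, List.cons_prefix_cons] at hpre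
            exact hv a (List.mem_cons_self ..) hpre.1
        | none =>
          rw [pvScan_cons_none d c cs hW] at hpre
          cases v with
          | nil => exact List.nil_prefix
          | cons a v =>
            rw [List.cons_prefix_cons] at hpre
            obtain ⟨rfl, hpre2⟩ := hpre
            exact List.cons_prefix_cons.mpr ⟨rfl,
              ih cs (Nat.lt_succ_iff.mp (by simpa using hl)) v
                (fun c hcm => hv c (List.mem_cons_of_mem _ hcm)) hpre2⟩
  intro v hv hpre
  exact H l.length l le_rfl v hv hpre

-- pvRepl with pattern 'p' :: os walks over 'p'-free text unchanged
lemma pvRepl_copy (os new : List Char) :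
    ∀ (u t : List Char), (∀ c ∈ u, c ≠ 'p') →
      pvRepl 'p' os new (u ++ t) = u ++ pvRepl 'p' os new t := by
  intro u
  induction u with
  | nil => intro t _; rfl
  | cons c u ih =>
    intro t hu
    have hc : c ≠ 'p' := hu c (List.mem_cons_self ..)
    have hnp : ¬ ('p' :: os).isPrefixOf (c :: (u ++ t)) = true := by
      rw [List.isPrefixOf_iff_prefix, List.cons_prefix_cons]
      rintro ⟨h1, -⟩
      exact hc h1.symm
    rw [List.cons_append, pvRepl, if_neg hnp, ih t (fun c hcm => hu c (List.mem_cons_of_mem _ hcm))]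
    simp

-- pvRepl skips over a different 26-char declaration block
lemma pvRepl_block (os new w : List Char) (hw : pvP26 w) (hlen : os.length = 25)
    (hne : ('p' :: os) ≠ w) (t : List Char) :
    pvRepl 'p' os new (w ++ t) = w ++ pvRepl 'p' os new t := by
  obtain ⟨wt, hwt⟩ := (List.head?_eq_some_iff ..).mp hw.2.1
  have hwt25 : wt.length = 25 := by
    have := hw.1
    rw [hwt] at this
    simpa using this
  have hnp : ¬ ('p' :: os).isPrefixOf ('p' :: (wt ++ t)) = true := by
    rw [List.isPrefixOf_iff_prefix, List.cons_prefix_cons]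
    rintro ⟨-, hpre⟩
    apply hne
    rw [hwt]
    have : os = (wt ++ t).take 25 := by
      obtain ⟨z, hz⟩ := hpre
      rw [← hz, List.take_append_of_le_length (by omega), List.take_of_length_le (by omega)]
    rw [this, List.take_append_of_le_length (by omega), List.take_of_length_le (by omega)]
  rw [hwt, List.cons_append, pvRepl, if_neg hnp,
    pvRepl_copy os new wt t (by intro c hcm; exact pvP26_nonp hw c (by rw [hwt]; exact hcm))]
  simp

lemma pvRepl_hit (os new t : List Char) :
    pvRepl 'p' os new (('p' :: os) ++ t) = new ++ pvRepl 'p' os new t := by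
  rw [List.cons_append, pvRepl, if_pos (List.isPrefixOf_iff_prefix.mpr (by simp [List.cons_prefix_cons]))]
  simp

-- MAIN LEMMA: one more sequential replace = one more table entry for the scanner
lemma pvMain (d : PySem.Dict String String) (p r : String)
    (hp : pvP26 p.toList) (hd : pvGood d)
    (hfresh : ∀ k w, d.get? k = some w → p ≠ k ∧ p ≠ w) :
    ∀ l, pvRepl 'p' p.toList.tail r.toList (pvScan d l) = pvScan (d.insert p r) l := by
  obtain ⟨pt, hpt⟩ := (List.head?_eq_some_iff ..).mp hp.2.1
  have hpt25 : pt.length = 25 := by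
    have := hp.1
    rw [hpt] at this
    simpa using this
  have hptnonp : ∀ c ∈ pt, c ≠ 'p' := by
    intro c hcm
    exact pvP26_nonp hp c (by rw [hpt]; exact hcm)
  have htail : p.toList.tail = pt := by rw [hpt, List.tail_cons]
  rw [htail]
  have H : ∀ (n : Nat) (l : List Char), l.length ≤ n →
      pvRepl 'p' pt r.toList (pvScan d l) = pvScan (d.insert p r) l := by
    intro n
    induction n with
    | zero =>
      intro l hl
      have : l = [] := List.eq_nil_of_length_eq_zero (Nat.le_zero.mp hl)
      subst this
      rw [pvScan_nil, pvScan_nil]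
      simp [pvRepl]
    | succ n ih =>
      intro l hl
      cases l with
      | nil =>
        rw [pvScan_nil, pvScan_nil]
        simp [pvRepl]
      | cons c cs =>
        cases hW : d.get? (String.ofList ((c :: cs).take 26)) with
        | some w =>
          have hWi : (d.insert p r).get? (String.ofList ((c :: cs).take 26)) = some w := by
            rw [PySem.Dict.get?_insert, if_neg (fun hh => (hfresh _ _ hW).1 hh.symm), hW]
          rw [pvScan_cons_some d c cs w hW, pvScan_cons_some _ c cs w hWi]
          have hnew : ('p' :: pt) ≠ w.toList := by
            intro he
            apply (hfresh _ _ hW).2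
            rw [← String.ofList_toList (s := p), ← String.ofList_toList (s := w), hpt, he]
          rw [pvRepl_block pt r.toList w.toList (hd _ _ hW).2 hpt25 hnew,
            ih (cs.drop 25) (by simp at hl ⊢; omega)]
        | none =>
          by_cases hc : String.ofList ((c :: cs).take 26) = p
          · have hWi : (d.insert p r).get? (String.ofList ((c :: cs).take 26)) = some r := by
              rw [PySem.Dict.get?_insert, if_pos hc]
            have htake : c :: cs.take 25 = 'p' :: pt := by
              have h2 := congrArg String.toList hc
              rw [String.toList_ofList, hpt] at h2
              rw [← List.take_succ_cons]
              exact h2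
            obtain ⟨hcp, htk⟩ : c = 'p' ∧ cs.take 25 = pt := by
              injection htake with h1 h2
              exact ⟨h1, h2⟩
            subst hcp
            rw [pvScan_cons_none d _ _ hW, pvScan_cons_some _ _ _ r hWi]
            have hcs : cs = pt ++ cs.drop 25 := by
              conv_lhs => rw [← List.take_append_drop 25 cs]
              rw [htk]
            conv_lhs => rw [hcs]
            rw [pvScan_copy d hd pt (cs.drop 25) hptnonp,
              show 'p' :: (pt ++ pvScan d (cs.drop 25)) = ('p' :: pt) ++ pvScan d (cs.drop 25) from rfl,
              pvRepl_hit pt r.toList (pvScan d (cs.drop 25)),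
              ih (cs.drop 25) (by simp at hl ⊢; omega)]
          · have hWi : (d.insert p r).get? (String.ofList ((c :: cs).take 26)) = none := by
              rw [PySem.Dict.get?_insert, if_neg hc, hW]
            rw [pvScan_cons_none d _ _ hW, pvScan_cons_none _ _ _ hWi]
            have hnp : ¬ ('p' :: pt).isPrefixOf (c :: pvScan d cs) = true := by
              rw [List.isPrefixOf_iff_prefix, List.cons_prefix_cons]
              rintro ⟨hc1, hpre⟩
              apply hc
              have hptcs : pt <+: cs := pvScan_prefix_nonp d hd cs pt hptnonp hpre
              have htake : (c :: cs).take 26 = 'p' :: pt := by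
                rw [List.take_succ_cons, ← hc1]
                congr 1
                obtain ⟨z, hz⟩ := hptcs
                rw [← hz, List.take_append_of_le_length (by omega),
                  List.take_of_length_le (by omega)]
              rw [htake, ← hpt, String.ofList_toList]
            rw [pvRepl, if_neg hnp, ih cs (Nat.lt_succ_iff.mp (by simpa using hl))]
  intro l
  exact H l.length l le_rfl

lemma pvStep (d : PySem.Dict String String) (p r : String)
    (hp : pvP26 p.toList) (hd : pvGood d)
    (hfresh : ∀ k w, d.get? k = some w → p ≠ k ∧ p ≠ w) (l : List Char) :
    PySem.Chars.replace (pvScan d l) p.toList r.toList = pvScan (d.insert p r) l := by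
  obtain ⟨pt, hpt⟩ := (List.head?_eq_some_iff ..).mp hp.2.1
  have h2 : p.toList = 'p' :: p.toList.tail := by rw [hpt, List.tail_cons]
  rw [h2, pvReplace_eq]
  exact pvMain d p r hp hd hfresh l

lemma pvGood_empty : pvGood PySem.Dict.empty := by
  intro k w h
  simp [PySem.Dict.get?, PySem.Dict.empty] at h

-- the 12 sequential replaces = the 12-entry table, one per insertion
lemma pvFold_scan (ps : List (String × String)) :
    ∀ (d : PySem.Dict String String), pvGood d →
      (∀ pr ∈ ps, pvP26 pr.1.toList ∧ pvP26 pr.2.toList) →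
      (∀ pr ∈ ps, ∀ k w, d.get? k = some w → pr.1 ≠ k ∧ pr.1 ≠ w) →
      List.Pairwise (fun a b => b.1 ≠ a.1 ∧ b.1 ≠ a.2) ps →
      ∀ l, ps.foldl (fun x pr => PySem.Chars.replace x pr.1.toList pr.2.toList) (pvScan d l)
          = pvScan (ps.foldl (fun dd pr => dd.insert pr.1 pr.2) d) l := by
  induction ps with
  | nil => intro d _ _ _ _ l; rfl
  | cons pr ps ih =>
    intro d hd hshape hfresh hpw l
    rw [List.foldl_cons, List.foldl_cons,
      pvStep d pr.1 pr.2 (hshape pr (List.mem_cons_self ..)).1 hd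
        (hfresh pr (List.mem_cons_self ..))]
    have hpw' := (List.pairwise_cons.mp hpw)
    apply ih (d.insert pr.1 pr.2)
    · intro k w h
      rw [PySem.Dict.get?_insert] at h
      split at h
      · cases h
        subst ‹k = pr.1›
        exact hshape pr (List.mem_cons_self ..)
      · exact hd k w h
    · intro q hq
      exact hshape q (List.mem_cons_of_mem _ hq)
    · intro q hq k w h
      rw [PySem.Dict.get?_insert] at h
      split at h
      · cases h
        subst ‹k = pr.1›
        exact hpw'.1 q hq
      · exact hfresh q (List.mem_cons_of_mem _ hq) k w h
    · exact hpw'.2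

-- the twelve declaration pairs, in A's replacement order
def pvPairs : List (String × String) :=
  [("pchMessageStart[0] = 0xf9;", "pchMessageStart[0] = 0xff;"),
   ("pchMessageStart[1] = 0xbe;", "pchMessageStart[1] = 0xdf;"),
   ("pchMessageStart[2] = 0xb4;", "pchMessageStart[2] = 0xdc;"),
   ("pchMessageStart[3] = 0xd9;", "pchMessageStart[3] = 0xfe;"),
   ("pchMessageStart[0] = 0x0b;", "pchMessageStart[0] = 0xab;"),
   ("pchMessageStart[1] = 0x11;", "pchMessageStart[1] = 0xd3;"),
   ("pchMessageStart[2] = 0x09;", "pchMessageStart[2] = 0xbf;"),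
   ("pchMessageStart[3] = 0x07;", "pchMessageStart[3] = 0xa5;"),
   ("pchMessageStart[0] = 0xfa;", "pchMessageStart[0] = 0xa9;"),
   ("pchMessageStart[1] = 0xbf;", "pchMessageStart[1] = 0xcd;"),
   ("pchMessageStart[2] = 0xb5;", "pchMessageStart[2] = 0xcc;"),
   ("pchMessageStart[3] = 0xda;", "pchMessageStart[3] = 0xff;")]

-- the fold of inserts over pvPairs builds exactly B's literal table
lemma pvPairs_table :
    pvPairs.foldl (fun dd pr => dd.insert pr.1 pr.2) PySem.Dict.empty = pvPchmsTable := by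
  decide

lemma pvA_eq (s : String) :
    replace_pchms s = pvPairs.foldl (fun m pr => PySem.Str.replace m pr.1 pr.2) s := by
  have hf1 : pvFromhex "f9beb4d9" = [249, 190, 180, 217] := by decide
  have hf2 : pvFromhex "ffdfdcfe" = [255, 223, 220, 254] := by decide
  have hf3 : pvFromhex "0b110907" = [11, 17, 9, 7] := by decide
  have hf4 : pvFromhex "abd3bfa5" = [171, 211, 191, 165] := by decide
  have hf5 : pvFromhex "fabfb5da" = [250, 191, 181, 218] := by decide
  have hf6 : pvFromhex "a9cdccff" = [169, 205, 204, 255] := by decide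
  have hr4 : PySem.List.pyRange 0 ((4 : Nat) : Int) 1 = [0, 1, 2, 3] := by decide
  have hm1 : pvPchmsFormat 0 (PySem.List.pyGetD [249, 190, 180, 217] 0 0) = "pchMessageStart[0] = 0xf9;" := by decide
  have hm2 : pvPchmsFormat 0 (PySem.List.pyGetD [255, 223, 220, 254] 0 0) = "pchMessageStart[0] = 0xff;" := by decide
  have hm3 : pvPchmsFormat 1 (PySem.List.pyGetD [249, 190, 180, 217] 1 0) = "pchMessageStart[1] = 0xbe;" := by decide
  have hm4 : pvPchmsFormat 1 (PySem.List.pyGetD [255, 223, 220, 254] 1 0) = "pchMessageStart[1] = 0xdf;" := by decide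
  have hm5 : pvPchmsFormat 2 (PySem.List.pyGetD [249, 190, 180, 217] 2 0) = "pchMessageStart[2] = 0xb4;" := by decide
  have hm6 : pvPchmsFormat 2 (PySem.List.pyGetD [255, 223, 220, 254] 2 0) = "pchMessageStart[2] = 0xdc;" := by decide
  have hm7 : pvPchmsFormat 3 (PySem.List.pyGetD [249, 190, 180, 217] 3 0) = "pchMessageStart[3] = 0xd9;" := by decide
  have hm8 : pvPchmsFormat 3 (PySem.List.pyGetD [255, 223, 220, 254] 3 0) = "pchMessageStart[3] = 0xfe;" := by decide
  have hm9 : pvPchmsFormat 0 (PySem.List.pyGetD [11, 17, 9, 7] 0 0) = "pchMessageStart[0] = 0x0b;" := by decide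
  have hm10 : pvPchmsFormat 0 (PySem.List.pyGetD [171, 211, 191, 165] 0 0) = "pchMessageStart[0] = 0xab;" := by decide
  have hm11 : pvPchmsFormat 1 (PySem.List.pyGetD [11, 17, 9, 7] 1 0) = "pchMessageStart[1] = 0x11;" := by decide
  have hm12 : pvPchmsFormat 1 (PySem.List.pyGetD [171, 211, 191, 165] 1 0) = "pchMessageStart[1] = 0xd3;" := by decide
  have hm13 : pvPchmsFormat 2 (PySem.List.pyGetD [11, 17, 9, 7] 2 0) = "pchMessageStart[2] = 0x09;" := by decide
  have hm14 : pvPchmsFormat 2 (PySem.List.pyGetD [171, 211, 191, 165] 2 0) = "pchMessageStart[2] = 0xbf;" := by decide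
  have hm15 : pvPchmsFormat 3 (PySem.List.pyGetD [11, 17, 9, 7] 3 0) = "pchMessageStart[3] = 0x07;" := by decide
  have hm16 : pvPchmsFormat 3 (PySem.List.pyGetD [171, 211, 191, 165] 3 0) = "pchMessageStart[3] = 0xa5;" := by decide
  have hm17 : pvPchmsFormat 0 (PySem.List.pyGetD [250, 191, 181, 218] 0 0) = "pchMessageStart[0] = 0xfa;" := by decide
  have hm18 : pvPchmsFormat 0 (PySem.List.pyGetD [169, 205, 204, 255] 0 0) = "pchMessageStart[0] = 0xa9;" := by decide
  have hm19 : pvPchmsFormat 1 (PySem.List.pyGetD [250, 191, 181, 218] 1 0) = "pchMessageStart[1] = 0xbf;" := by decide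
  have hm20 : pvPchmsFormat 1 (PySem.List.pyGetD [169, 205, 204, 255] 1 0) = "pchMessageStart[1] = 0xcd;" := by decide
  have hm21 : pvPchmsFormat 2 (PySem.List.pyGetD [250, 191, 181, 218] 2 0) = "pchMessageStart[2] = 0xb5;" := by decide
  have hm22 : pvPchmsFormat 2 (PySem.List.pyGetD [169, 205, 204, 255] 2 0) = "pchMessageStart[2] = 0xcc;" := by decide
  have hm23 : pvPchmsFormat 3 (PySem.List.pyGetD [250, 191, 181, 218] 3 0) = "pchMessageStart[3] = 0xda;" := by decide
  have hm24 : pvPchmsFormat 3 (PySem.List.pyGetD [169, 205, 204, 255] 3 0) = "pchMessageStart[3] = 0xff;" := by decide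
  simp only [replace_pchms, pvPairs, pvReplacesPchms, List.foldl_cons, List.foldl_nil,
    List.length_cons, List.length_nil, hf1, hf2, hf3, hf4, hf5, hf6, hr4, hm1, hm2, hm3, hm4, hm5, hm6, hm7, hm8, hm9, hm10, hm11, hm12, hm13, hm14, hm15, hm16, hm17, hm18, hm19, hm20, hm21, hm22, hm23, hm24]

-- ===== VERDICT (by name: the statement is the Claim_ definition above) =====
set_option maxRecDepth 8192 in
theorem replace_pchms_spec : Claim_equal_replace_pchms := by
  intro chainparams _
  show replace_pchms chainparams = replace_pchms_alt chainparams
  have h : (replace_pchms chainparams).toList = (replace_pchms_alt chainparams).toList := by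
    rw [pvA_eq, pvFold_toList]
    have ht1 : ("pchMessageStart[0] = 0xf9;" : String).toList = ['p', 'c', 'h', 'M', 'e', 's', 's', 'a', 'g', 'e', 'S', 't', 'a', 'r', 't', '[', '0', ']', ' ', '=', ' ', '0', 'x', 'f', '9', ';'] := rfl
    have ht2 : ("pchMessageStart[0] = 0xff;" : String).toList = ['p', 'c', 'h', 'M', 'e', 's', 's', 'a', 'g', 'e', 'S', 't', 'a', 'r', 't', '[', '0', ']', ' ', '=', ' ', '0', 'x', 'f', 'f', ';'] := rfl
    have ht3 : ("pchMessageStart[1] = 0xbe;" : String).toList = ['p', 'c', 'h', 'M', 'e', 's', 's', 'a', 'g', 'e', 'S', 't', 'a', 'r', 't', '[', '1', ']', ' ', '=', ' ', '0', 'x', 'b', 'e', ';'] := rfl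
    have ht4 : ("pchMessageStart[1] = 0xdf;" : String).toList = ['p', 'c', 'h', 'M', 'e', 's', 's', 'a', 'g', 'e', 'S', 't', 'a', 'r', 't', '[', '1', ']', ' ', '=', ' ', '0', 'x', 'd', 'f', ';'] := rfl
    have ht5 : ("pchMessageStart[2] = 0xb4;" : String).toList = ['p', 'c', 'h', 'M', 'e', 's', 's', 'a', 'g', 'e', 'S', 't', 'a', 'r', 't', '[', '2', ']', ' ', '=', ' ', '0', 'x', 'b', '4', ';'] := rfl
    have ht6 : ("pchMessageStart[2] = 0xdc;" : String).toList = ['p', 'c', 'h', 'M', 'e', 's', 's', 'a', 'g', 'e', 'S', 't', 'a', 'r', 't', '[', '2', ']', ' ', '=', ' ', '0', 'x', 'd', 'c', ';'] := rfl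
    have ht7 : ("pchMessageStart[3] = 0xd9;" : String).toList = ['p', 'c', 'h', 'M', 'e', 's', 's', 'a', 'g', 'e', 'S', 't', 'a', 'r', 't', '[', '3', ']', ' ', '=', ' ', '0', 'x', 'd', '9', ';'] := rfl
    have ht8 : ("pchMessageStart[3] = 0xfe;" : String).toList = ['p', 'c', 'h', 'M', 'e', 's', 's', 'a', 'g', 'e', 'S', 't', 'a', 'r', 't', '[', '3', ']', ' ', '=', ' ', '0', 'x', 'f', 'e', ';'] := rfl
    have ht9 : ("pchMessageStart[0] = 0x0b;" : String).toList = ['p', 'c', 'h', 'M', 'e', 's', 's', 'a', 'g', 'e', 'S', 't', 'a', 'r', 't', '[', '0', ']', ' ', '=', ' ', '0', 'x', '0', 'b', ';'] := rfl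
    have ht10 : ("pchMessageStart[0] = 0xab;" : String).toList = ['p', 'c', 'h', 'M', 'e', 's', 's', 'a', 'g', 'e', 'S', 't', 'a', 'r', 't', '[', '0', ']', ' ', '=', ' ', '0', 'x', 'a', 'b', ';'] := rfl
    have ht11 : ("pchMessageStart[1] = 0x11;" : String).toList = ['p', 'c', 'h', 'M', 'e', 's', 's', 'a', 'g', 'e', 'S', 't', 'a', 'r', 't', '[', '1', ']', ' ', '=', ' ', '0', 'x', '1', '1', ';'] := rfl
    have ht12 : ("pchMessageStart[1] = 0xd3;" : String).toList = ['p', 'c', 'h', 'M', 'e', 's', 's', 'a', 'g', 'e', 'S', 't', 'a', 'r', 't', '[', '1', ']', ' ', '=', ' ', '0', 'x', 'd', '3', ';'] := rfl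
    have ht13 : ("pchMessageStart[2] = 0x09;" : String).toList = ['p', 'c', 'h', 'M', 'e', 's', 's', 'a', 'g', 'e', 'S', 't', 'a', 'r', 't', '[', '2', ']', ' ', '=', ' ', '0', 'x', '0', '9', ';'] := rfl
    have ht14 : ("pchMessageStart[2] = 0xbf;" : String).toList = ['p', 'c', 'h', 'M', 'e', 's', 's', 'a', 'g', 'e', 'S', 't', 'a', 'r', 't', '[', '2', ']', ' ', '=', ' ', '0', 'x', 'b', 'f', ';'] := rfl
    have ht15 : ("pchMessageStart[3] = 0x07;" : String).toList = ['p', 'c', 'h', 'M', 'e', 's', 's', 'a', 'g', 'e', 'S', 't', 'a', 'r', 't', '[', '3', ']', ' ', '=', ' ', '0', 'x', '0', '7', ';'] := rfl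
    have ht16 : ("pchMessageStart[3] = 0xa5;" : String).toList = ['p', 'c', 'h', 'M', 'e', 's', 's', 'a', 'g', 'e', 'S', 't', 'a', 'r', 't', '[', '3', ']', ' ', '=', ' ', '0', 'x', 'a', '5', ';'] := rfl
    have ht17 : ("pchMessageStart[0] = 0xfa;" : String).toList = ['p', 'c', 'h', 'M', 'e', 's', 's', 'a', 'g', 'e', 'S', 't', 'a', 'r', 't', '[', '0', ']', ' ', '=', ' ', '0', 'x', 'f', 'a', ';'] := rfl
    have ht18 : ("pchMessageStart[0] = 0xa9;" : String).toList = ['p', 'c', 'h', 'M', 'e', 's', 's', 'a', 'g', 'e', 'S', 't', 'a', 'r', 't', '[', '0', ']', ' ', '=', ' ', '0', 'x', 'a', '9', ';'] := rfl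
    have ht19 : ("pchMessageStart[1] = 0xbf;" : String).toList = ['p', 'c', 'h', 'M', 'e', 's', 's', 'a', 'g', 'e', 'S', 't', 'a', 'r', 't', '[', '1', ']', ' ', '=', ' ', '0', 'x', 'b', 'f', ';'] := rfl
    have ht20 : ("pchMessageStart[1] = 0xcd;" : String).toList = ['p', 'c', 'h', 'M', 'e', 's', 's', 'a', 'g', 'e', 'S', 't', 'a', 'r', 't', '[', '1', ']', ' ', '=', ' ', '0', 'x', 'c', 'd', ';'] := rfl
    have ht21 : ("pchMessageStart[2] = 0xb5;" : String).toList = ['p', 'c', 'h', 'M', 'e', 's', 's', 'a', 'g', 'e', 'S', 't', 'a', 'r', 't', '[', '2', ']', ' ', '=', ' ', '0', 'x', 'b', '5', ';'] := rfl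
    have ht22 : ("pchMessageStart[2] = 0xcc;" : String).toList = ['p', 'c', 'h', 'M', 'e', 's', 's', 'a', 'g', 'e', 'S', 't', 'a', 'r', 't', '[', '2', ']', ' ', '=', ' ', '0', 'x', 'c', 'c', ';'] := rfl
    have ht23 : ("pchMessageStart[3] = 0xda;" : String).toList = ['p', 'c', 'h', 'M', 'e', 's', 's', 'a', 'g', 'e', 'S', 't', 'a', 'r', 't', '[', '3', ']', ' ', '=', ' ', '0', 'x', 'd', 'a', ';'] := rfl
    have ht24 : ("pchMessageStart[3] = 0xff;" : String).toList = ['p', 'c', 'h', 'M', 'e', 's', 's', 'a', 'g', 'e', 'S', 't', 'a', 'r', 't', '[', '3', ']', ' ', '=', ' ', '0', 'x', 'f', 'f', ';'] := rfl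
    have hshape : ∀ pr ∈ pvPairs, pvP26 pr.1.toList ∧ pvP26 pr.2.toList := by
      simp only [pvPairs, List.forall_mem_cons, List.not_mem_nil, false_implies, implies_true, and_true, ht1, ht2, ht3, ht4, ht5, ht6, ht7, ht8, ht9, ht10, ht11, ht12, ht13, ht14, ht15, ht16, ht17, ht18, ht19, ht20, ht21, ht22, ht23, ht24]
      repeat' apply And.intro
      all_goals decide
    have hpw : List.Pairwise (fun (a b : String × String) => b.1 ≠ a.1 ∧ b.1 ≠ a.2) pvPairs := by
      simp only [pvPairs, List.pairwise_cons, List.forall_mem_cons, List.not_mem_nil,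
        false_implies, implies_true, and_true, true_and]
      repeat' apply And.intro
      all_goals decide
    have := pvFold_scan pvPairs PySem.Dict.empty pvGood_empty hshape
      (fun pr _ k w h => absurd h (by simp [PySem.Dict.get?, PySem.Dict.empty]))
      hpw chainparams.toList
    rw [pvScan_empty, pvPairs_table] at this
    rw [this]
    simp [replace_pchms_alt]
  have h2 := congrArg String.ofList h
  rwa [String.ofList_toList, String.ofList_toList] at h2
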